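-- pv_equiv track=rewrite | github.com/Mohammed-App-creater/week_2 | scripts/generate_report.py | interpret_topic
-- ===== SOURCE A (Python) =====
-- def interpret_topic(words):
--     """Generate human-readable topic interpretation."""
--     # Simple heuristic-based interpretation
--     words_lower = [w.lower() for w in words]
--
--     if any(word in words_lower for word in ['crash', 'error', 'problem', 'issue', 'bug']):
--         return "Technical issues and app stability problems"
--     elif any(word in words_lower for word in ['login', 'password', 'account', 'access']):
--         return "Authentication and account access concerns"
--     elif any(word in words_lower for word in ['transfer', 'transaction', 'payment', 'money']):
--         return "Transaction and payment-related topics"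
--     elif any(word in words_lower for word in ['easy', 'simple', 'convenient', 'fast', 'good']):
--         return "Positive user experience and convenience"
--     elif any(word in words_lower for word in ['update', 'new', 'feature', 'version']):
--         return "App updates and new features"
--     elif any(word in words_lower for word in ['service', 'support', 'help', 'customer']):
--         return "Customer service and support"
--     elif any(word in words_lower for word in ['network', 'connection', 'internet', 'server']):
--         return "Network connectivity and server issues"
--     else:
--         return "General banking app experience"
-- ===== SOURCE B (Python) =====
-- DESCRIPTIONS = [
--     "Technical issues and app stability problems",
--     "Authentication and account access concerns",
--     "Transaction and payment-related topics",
--     "Positive user experience and convenience",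
--     "App updates and new features",
--     "Customer service and support",
--     "Network connectivity and server issues",
--     "General banking app experience",
-- ]
--
-- # keyword -> index of its category (smaller index = higher priority branch in the spec)
-- KEYWORD_CATEGORY = {
--     'crash': 0, 'error': 0, 'problem': 0, 'issue': 0, 'bug': 0,
--     'login': 1, 'password': 1, 'account': 1, 'access': 1,
--     'transfer': 2, 'transaction': 2, 'payment': 2, 'money': 2,
--     'easy': 3, 'simple': 3, 'convenient': 3, 'fast': 3, 'good': 3,
--     'update': 4, 'new': 4, 'feature': 4, 'version': 4,
--     'service': 5, 'support': 5, 'help': 5, 'customer': 5,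
--     'network': 6, 'connection': 6, 'internet': 6, 'server': 6,
-- }
--
--
-- def interpret_topic(words):
--     """Generate human-readable topic interpretation."""
--     # One pass over the words: keep the smallest matched category index.
--     best = 7  # index of the default description
--     for w in words:
--         best = min(best, KEYWORD_CATEGORY.get(w.lower(), 7))
--     return DESCRIPTIONS[best]
-- ===== Notes on version B (the rewrite author's own statement) =====
-- stated objective: faster
-- what changed: Instead of testing each category's keyword list against the whole word list in an if-elif chain, B makes a single pass over the words, mapping each lowered word to a category index via a keyword-to-index dict and keeping the minimum index seen; the answer is that index's description (minimum index = first matching branch).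
import Mathlib
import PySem

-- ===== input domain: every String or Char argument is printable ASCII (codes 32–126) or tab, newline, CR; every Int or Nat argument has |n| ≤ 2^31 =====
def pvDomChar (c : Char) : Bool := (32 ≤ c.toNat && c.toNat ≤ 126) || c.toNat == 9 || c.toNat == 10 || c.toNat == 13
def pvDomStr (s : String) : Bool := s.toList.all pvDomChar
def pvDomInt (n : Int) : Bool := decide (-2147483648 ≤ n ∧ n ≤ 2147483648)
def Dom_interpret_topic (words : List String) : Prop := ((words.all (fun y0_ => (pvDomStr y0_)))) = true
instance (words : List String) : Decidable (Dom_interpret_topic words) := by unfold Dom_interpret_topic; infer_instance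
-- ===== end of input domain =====

-- B replaces A's category-by-category if-elif scan with a single pass over the words, keeping the
-- minimum category index matched via a keyword→index dict (objective: faster, measured).

-- ===== PORT A =====
def interpret_topic (words : List String) : String :=
  let words_lower := words.map PySem.Str.lower
  if ["crash", "error", "problem", "issue", "bug"].any (fun w => words_lower.contains w) then
    "Technical issues and app stability problems"
  else if ["login", "password", "account", "access"].any (fun w => words_lower.contains w) then
    "Authentication and account access concerns"
  else if ["transfer", "transaction", "payment", "money"].any (fun w => words_lower.contains w) then
    "Transaction and payment-related topics"
  else if ["easy", "simple", "convenient", "fast", "good"].any (fun w => words_lower.contains w) then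
    "Positive user experience and convenience"
  else if ["update", "new", "feature", "version"].any (fun w => words_lower.contains w) then
    "App updates and new features"
  else if ["service", "support", "help", "customer"].any (fun w => words_lower.contains w) then
    "Customer service and support"
  else if ["network", "connection", "internet", "server"].any (fun w => words_lower.contains w) then
    "Network connectivity and server issues"
  else
    "General banking app experience"

-- ===== PORT B =====
def pvDescriptions : List String :=
  [ "Technical issues and app stability problems",
    "Authentication and account access concerns",
    "Transaction and payment-related topics",
    "Positive user experience and convenience",
    "App updates and new features",
    "Customer service and support",
    "Network connectivity and server issues",
    "General banking app experience" ]

-- keyword -> index of its category (the KEYWORD_CATEGORY dict literal of Source B)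
def pvKeywordCategory : PySem.Dict String Nat :=
  PySem.Dict.ofList
  [ ("crash", 0), ("error", 0), ("problem", 0), ("issue", 0), ("bug", 0),
    ("login", 1), ("password", 1), ("account", 1), ("access", 1),
    ("transfer", 2), ("transaction", 2), ("payment", 2), ("money", 2),
    ("easy", 3), ("simple", 3), ("convenient", 3), ("fast", 3), ("good", 3),
    ("update", 4), ("new", 4), ("feature", 4), ("version", 4),
    ("service", 5), ("support", 5), ("help", 5), ("customer", 5),
    ("network", 6), ("connection", 6), ("internet", 6), ("server", 6) ]

def interpret_topic_alt (words : List String) : String :=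
  -- one pass: best = min over words of the category index (7 = default)
  let best := words.foldl
    (fun best w => min best (PySem.Dict.getD pvKeywordCategory (PySem.Str.lower w) 7)) 7
  -- DESCRIPTIONS[best]; best ≤ 7 < 8 is always in range, so getD's default is unreachable
  pvDescriptions.getD best ""

-- ===== PRECONDITION & SPEC =====
def Spec_interpret_topic (words : List String) (out : String) : Prop := out = interpret_topic_alt words
instance (words : List String) (out : String) : Decidable (Spec_interpret_topic words out) := by unfold Spec_interpret_topic; infer_instance

-- ===== CLAIM (what is proved, stated in full; the proofs are below) =====
def Claim_equal_interpret_topic : Prop := ∀ (words : List String), Dom_interpret_topic words → Spec_interpret_topic words (interpret_topic words)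

-- ===== LEMMAS AND PROOFS =====

-- the keyword list of category i (A's i-th branch), [] past the last category
def pvKwsIdx : Nat → List String
  | 0 => ["crash", "error", "problem", "issue", "bug"]
  | 1 => ["login", "password", "account", "access"]
  | 2 => ["transfer", "transaction", "payment", "money"]
  | 3 => ["easy", "simple", "convenient", "fast", "good"]
  | 4 => ["update", "new", "feature", "version"]
  | 5 => ["service", "support", "help", "customer"]
  | 6 => ["network", "connection", "internet", "server"]
  | _ => []

-- every keyword of category i maps to i in the dict
theorem pvCat_of_mem (i : Nat) (hi : i < 7) (k : String) (hk : k ∈ pvKwsIdx i) :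
    PySem.Dict.getD pvKeywordCategory k 7 = i := by
  interval_cases i <;> (simp [pvKwsIdx] at hk) <;> rcases hk with rfl | rfl | rfl | rfl | rfl <;> decide

-- any string either misses the dict (value 7) or is a keyword of its category
theorem pvCat_spec (s : String) :
    PySem.Dict.getD pvKeywordCategory s 7 = 7 ∨ s ∈ pvKwsIdx (PySem.Dict.getD pvKeywordCategory s 7) := by
  by_cases hs : s ∈ ["crash", "error", "problem", "issue", "bug", "login", "password", "account", "access", "transfer", "transaction", "payment", "money", "easy", "simple", "convenient", "fast", "good", "update", "new", "feature", "version", "service", "support", "help", "customer", "network", "connection", "internet", "server"]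
  · fin_cases hs <;> decide
  · left
    apply PySem.Dict.getD_of_not_contains
    rw [PySem.Dict.contains_eq_decide_mem_keys]
    have hkeys : pvKeywordCategory.keys = ["crash", "error", "problem", "issue", "bug", "login", "password", "account", "access", "transfer", "transaction", "payment", "money", "easy", "simple", "convenient", "fast", "good", "update", "new", "feature", "version", "service", "support", "help", "customer", "network", "connection", "internet", "server"] := by decide
    rw [decide_eq_false_iff_not, hkeys]
    exact hs

-- if some keyword of category i occurs among the lowered words, the running minimum is ≤ i
theorem pv_min_le_of_cond (words : List String) (i : Nat) (hi : i < 7)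
    (h : (pvKwsIdx i).any (fun k => (words.map PySem.Str.lower).contains k) = true) :
    (words.map (fun w => PySem.Dict.getD pvKeywordCategory (PySem.Str.lower w) 7)).foldl min 7 ≤ i := by
  rcases List.any_eq_true.mp h with ⟨k, hk, hcont⟩
  rcases List.mem_map.mp (by simpa using hcont) with ⟨w, hw, rfl⟩
  have : PySem.Dict.getD pvKeywordCategory (PySem.Str.lower w) 7 = i := pvCat_of_mem i hi _ hk
  calc (words.map (fun w => PySem.Dict.getD pvKeywordCategory (PySem.Str.lower w) 7)).foldl min 7
      ≤ PySem.Dict.getD pvKeywordCategory (PySem.Str.lower w) 7 :=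
        (PySem.List.foldl_min_le _ _).2 _ (List.mem_map.mpr ⟨w, hw, rfl⟩)
    _ = i := this

-- if the running minimum equals v < 7, some keyword of category v occurs among the lowered words
theorem pv_cond_of_min_eq (words : List String) (v : Nat) (hv : v < 7)
    (h : (words.map (fun w => PySem.Dict.getD pvKeywordCategory (PySem.Str.lower w) 7)).foldl min 7 = v) :
    (pvKwsIdx v).any (fun k => (words.map PySem.Str.lower).contains k) = true := by
  rcases PySem.List.foldl_min_mem (words.map (fun w => PySem.Dict.getD pvKeywordCategory (PySem.Str.lower w) 7)) 7 with h7 | hmem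
  · omega
  · rw [h] at hmem
    rcases List.mem_map.mp hmem with ⟨w, hw, hcw⟩
    rcases pvCat_spec (PySem.Str.lower w) with h7' | hk
    · omega
    · rw [hcw] at hk
      exact List.any_eq_true.mpr ⟨_, hk, by simpa using ⟨w, hw, rfl⟩⟩

-- ===== VERDICT (by name: the statement is the Claim_ definition above) =====
theorem interpret_topic_spec : Claim_equal_interpret_topic := by
  intro words _
  unfold Spec_interpret_topic interpret_topic interpret_topic_alt
  rw [show words.foldl (fun best w => min best (PySem.Dict.getD pvKeywordCategory (PySem.Str.lower w) 7)) 7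
        = (words.map (fun w => PySem.Dict.getD pvKeywordCategory (PySem.Str.lower w) 7)).foldl min 7
      from (List.foldl_map ..).symm]
  have hle : (words.map (fun w => PySem.Dict.getD pvKeywordCategory (PySem.Str.lower w) 7)).foldl min 7 ≤ 7 :=
    (PySem.List.foldl_min_le _ 7).1
  obtain ⟨m, hm⟩ : ∃ m, (words.map (fun w => PySem.Dict.getD pvKeywordCategory (PySem.Str.lower w) 7)).foldl min 7 = m := ⟨_, rfl⟩
  rw [hm] at hle ⊢
  have hfalse : ∀ i, i < m → (pvKwsIdx i).any (fun k => (words.map PySem.Str.lower).contains k) = false := by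
    intro i hi
    cases hc : (pvKwsIdx i).any (fun k => (words.map PySem.Str.lower).contains k) with
    | false => rfl
    | true =>
        have := pv_min_le_of_cond words i (by omega) hc
        rw [hm] at this
        omega
  have htrue : m < 7 → (pvKwsIdx m).any (fun k => (words.map PySem.Str.lower).contains k) = true :=
    fun h => pv_cond_of_min_eq words m h hm
  interval_cases m
  · have t := htrue (by norm_num)
    simp only [pvKwsIdx] at t
    simp only [t]
    simp [pvDescriptions]
  · have t := htrue (by norm_num)
    have f0 := hfalse 0 (by norm_num)
    simp only [pvKwsIdx] at t f0
    simp only [t, f0]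
    simp [pvDescriptions]
  · have t := htrue (by norm_num)
    have f0 := hfalse 0 (by norm_num)
    have f1 := hfalse 1 (by norm_num)
    simp only [pvKwsIdx] at t f0 f1
    simp only [t, f0, f1]
    simp [pvDescriptions]
  · have t := htrue (by norm_num)
    have f0 := hfalse 0 (by norm_num)
    have f1 := hfalse 1 (by norm_num)
    have f2 := hfalse 2 (by norm_num)
    simp only [pvKwsIdx] at t f0 f1 f2
    simp only [t, f0, f1, f2]
    simp [pvDescriptions]
  · have t := htrue (by norm_num)
    have f0 := hfalse 0 (by norm_num)
    have f1 := hfalse 1 (by norm_num)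
    have f2 := hfalse 2 (by norm_num)
    have f3 := hfalse 3 (by norm_num)
    simp only [pvKwsIdx] at t f0 f1 f2 f3
    simp only [t, f0, f1, f2, f3]
    simp [pvDescriptions]
  · have t := htrue (by norm_num)
    have f0 := hfalse 0 (by norm_num)
    have f1 := hfalse 1 (by norm_num)
    have f2 := hfalse 2 (by norm_num)
    have f3 := hfalse 3 (by norm_num)
    have f4 := hfalse 4 (by norm_num)
    simp only [pvKwsIdx] at t f0 f1 f2 f3 f4
    simp only [t, f0, f1, f2, f3, f4]
    simp [pvDescriptions]
  · have t := htrue (by norm_num)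
    have f0 := hfalse 0 (by norm_num)
    have f1 := hfalse 1 (by norm_num)
    have f2 := hfalse 2 (by norm_num)
    have f3 := hfalse 3 (by norm_num)
    have f4 := hfalse 4 (by norm_num)
    have f5 := hfalse 5 (by norm_num)
    simp only [pvKwsIdx] at t f0 f1 f2 f3 f4 f5
    simp only [t, f0, f1, f2, f3, f4, f5]
    simp [pvDescriptions]
  · have f0 := hfalse 0 (by norm_num)
    have f1 := hfalse 1 (by norm_num)
    have f2 := hfalse 2 (by norm_num)
    have f3 := hfalse 3 (by norm_num)
    have f4 := hfalse 4 (by norm_num)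
    have f5 := hfalse 5 (by norm_num)
    have f6 := hfalse 6 (by norm_num)
    simp only [pvKwsIdx] at f0 f1 f2 f3 f4 f5 f6
    simp only [f0, f1, f2, f3, f4, f5, f6]
    simp [pvDescriptions]
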